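-- pv_equiv track=rewrite | github.com/AbhinavRajesh/Advent-Of-Code | 2015/Day11/day11.py | rule3
-- ===== SOURCE A (Python) =====
-- def rule3(password):
--     nrep = 0
--     i = 0
--     while i < (len(password) - 1):
--         if password[i] == password[i + 1]:
--             nrep += 1
--             i += 1
--         i += 1
--     return nrep > 1
-- ===== SOURCE B (Python) =====
-- def rule3(password):
--     # Run-length view: each maximal run of L equal characters contributes L // 2
--     # non-overlapping pairs; compare the total against 2.
--     total = 0
--     run = 1
--     for prev, cur in zip(password, password[1:]):
--         if cur == prev:
--             run += 1
--         else:
--             total += run // 2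
--             run = 1
--     total += run // 2
--     return total >= 2
-- ===== Notes on version B (the rewrite author's own statement) =====
-- stated objective: alternative
-- what changed: Replaces A's stateful skip-by-two index while loop with a run-length pass: fold over adjacent character pairs maintaining the current run length, summing run//2 per maximal run.
import Mathlib
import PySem

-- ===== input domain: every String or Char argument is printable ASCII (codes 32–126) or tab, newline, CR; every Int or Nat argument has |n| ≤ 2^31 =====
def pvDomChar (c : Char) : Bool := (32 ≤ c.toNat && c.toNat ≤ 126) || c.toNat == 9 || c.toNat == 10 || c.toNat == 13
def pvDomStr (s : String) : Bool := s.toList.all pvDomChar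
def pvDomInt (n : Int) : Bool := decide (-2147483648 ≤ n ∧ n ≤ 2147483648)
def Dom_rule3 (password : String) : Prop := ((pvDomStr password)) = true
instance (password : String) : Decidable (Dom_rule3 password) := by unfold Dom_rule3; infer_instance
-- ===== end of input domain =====

-- B replaces A's skip-by-two index while loop with a run-length pass over adjacent
-- character pairs (objective: alternative).


-- ===== PORT A =====
-- while loop over index i with counter nrep; i, nrep are Nat (i starts at 0, only grows;
-- 'i < len(password) - 1' over Python ints equals 'i + 1 < length' since i ≥ 0)
def rule3Loop (cs : List Char) (i nrep : Nat) : Nat :=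
  if h : i + 1 < cs.length then
    if cs[i]'(by omega) = cs[i+1]'h then rule3Loop cs (i+2) (nrep+1)
    else rule3Loop cs (i+1) nrep
  else nrep
termination_by cs.length - i

def rule3 (password : String) : Bool :=
  decide (rule3Loop password.toList 0 0 > 1)

-- ===== PORT B =====
-- 'for prev, cur in zip(password, password[1:])' over state (total, run); then 'total += run // 2'
def rule3Step (st : Nat × Nat) (pc : Char × Char) : Nat × Nat :=
  if pc.2 = pc.1 then (st.1, st.2 + 1) else (st.1 + st.2 / 2, 1)

def rule3_alt (password : String) : Bool :=
  let cs := password.toList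
  let st := (cs.zip cs.tail).foldl rule3Step (0, 1)
  decide (st.1 + st.2 / 2 ≥ 2)

-- ===== PRECONDITION & SPEC =====
def Spec_rule3 (password : String) (out : Bool) : Prop := out = rule3_alt password
instance (password : String) (out : Bool) : Decidable (Spec_rule3 password out) := by unfold Spec_rule3; infer_instance

-- ===== CLAIM (what is proved, stated in full; the proofs are below) =====
def Claim_equal_rule3 : Prop := ∀ (password : String), Dom_rule3 password → Spec_rule3 password (rule3 password)

-- ===== LEMMAS AND PROOFS =====

-- skip-by-two pair count (proof-side characterisation shared by both ports)
def rule3Pairs : List Char → Nat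
  | a :: b :: rest => if a = b then 1 + rule3Pairs rest else rule3Pairs (b :: rest)
  | _ => 0

-- A's loop computes rule3Pairs of the remaining suffix
lemma rule3Loop_eq (cs : List Char) (i nrep : Nat) :
    rule3Loop cs i nrep = nrep + rule3Pairs (cs.drop i) := by
  induction i, nrep using rule3Loop.induct (cs := cs) with
  | case1 i nrep h he ih =>
    have hd : cs.drop i = cs[i]'(by omega) :: cs[i+1]'h :: cs.drop (i+2) := by
      rw [List.drop_eq_getElem_cons (by omega : i < cs.length), List.drop_eq_getElem_cons h]
    rw [rule3Loop]
    simp only [h, dite_true, if_pos he]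
    rw [ih, hd, rule3Pairs, if_pos he]
    omega
  | case2 i nrep h he ih =>
    have hd : cs.drop i = cs[i]'(by omega) :: cs[i+1]'h :: cs.drop (i+2) := by
      rw [List.drop_eq_getElem_cons (by omega : i < cs.length), List.drop_eq_getElem_cons h]
    rw [rule3Loop]
    simp only [h, dite_true, if_neg he]
    rw [ih, hd,
      show cs.drop (i+1) = cs[i+1]'h :: cs.drop (i+2) from List.drop_eq_getElem_cons h,
      rule3Pairs, if_neg he]
  | case3 i nrep h =>
    rw [rule3Loop, dif_neg h]
    have hlen : (cs.drop i).length ≤ 1 := by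
      rw [List.length_drop]; omega
    rcases hd : cs.drop i with _ | ⟨a, _ | ⟨b, t⟩⟩
    · simp [rule3Pairs]
    · simp [rule3Pairs]
    · rw [hd] at hlen; simp at hlen

-- pairs contributed by a pending run of length `run` ending in `c`, followed by `rest`
def rule3Cnt (run : Nat) (c : Char) : List Char → Nat
  | [] => run / 2
  | d :: rest => if d = c then rule3Cnt (run + 1) d rest else run / 2 + rule3Cnt 1 d rest

lemma rule3_fold_eq (rest : List Char) (c : Char) (total run : Nat) :
    (let st := List.foldl rule3Step (total, run) ((c :: rest).zip rest)
     st.1 + st.2 / 2) = total + rule3Cnt run c rest := by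
  induction rest generalizing c total run with
  | nil => simp [rule3Cnt]
  | cons d rest ih =>
    show (let st := List.foldl rule3Step (rule3Step (total, run) (c, d)) ((d :: rest).zip rest)
          st.1 + st.2 / 2) = total + rule3Cnt run c (d :: rest)
    by_cases hdc : d = c
    · rw [show rule3Step (total, run) (c, d) = (total, run + 1) by simp [rule3Step, hdc],
        ih d total (run + 1), rule3Cnt, if_pos hdc]
    · rw [show rule3Step (total, run) (c, d) = (total + run / 2, 1) by simp [rule3Step, hdc],
        ih d (total + run / 2) 1, rule3Cnt, if_neg hdc]
      omega

lemma rule3Pairs_replicate (r : Nat) (c : Char) (t : List Char)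
    (ht : ∀ h, t.head? = some h → h ≠ c) :
    rule3Pairs (List.replicate r c ++ t) = r / 2 + rule3Pairs t := by
  induction r using Nat.strong_induction_on with
  | _ r ih =>
    match r with
    | 0 => simp
    | 1 =>
      cases t with
      | nil => simp [rule3Pairs]
      | cons d t' =>
        have : d ≠ c := ht d rfl
        simp [rule3Pairs, List.replicate, this.symm]
    | (r' + 2) =>
      rw [show List.replicate (r' + 2) c ++ t = c :: c :: (List.replicate r' c ++ t) by
        simp [List.replicate_succ], rule3Pairs, if_pos rfl, ih r' (by omega)]
      omega

lemma rule3Cnt_eq (rest : List Char) (run : Nat) (c : Char) :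
    rule3Cnt run c rest = rule3Pairs (List.replicate run c ++ rest) := by
  induction rest generalizing run c with
  | nil =>
    have h := rule3Pairs_replicate run c [] (by simp)
    simp only [List.append_nil, rule3Pairs] at h
    simp [rule3Cnt, h]
  | cons d rest ih =>
    rw [rule3Cnt]
    by_cases hdc : d = c
    · rw [if_pos hdc, ih (run + 1) d,
        show List.replicate (run + 1) d ++ rest = List.replicate run c ++ (d :: rest) by
          subst hdc; simp [List.replicate_succ']]
    · rw [if_neg hdc, ih 1 d,
        rule3Pairs_replicate run c (d :: rest) (by intro h hh; simp at hh; subst hh; exact hdc)]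
      simp

-- ===== VERDICT (by name: the statement is the Claim_ definition above) =====
theorem rule3_spec : Claim_equal_rule3 := by
  intro password _
  unfold Spec_rule3 rule3 rule3_alt
  rw [rule3Loop_eq]
  cases hcs : password.toList with
  | nil => simp [rule3Pairs]
  | cons c rest =>
    simp only [List.drop_zero, List.tail_cons]
    have h1 := rule3_fold_eq rest c 0 1
    simp only [] at h1
    rw [rule3Cnt_eq rest 1 c] at h1
    simp only [List.replicate_one, List.singleton_append, Nat.zero_add] at h1
    simp only [h1, decide_eq_decide]
    omega
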